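-- pv_equiv track=rewrite | github.com/junho100/algorithm_for_test | algorithm/1316.PY | solve
-- ===== SOURCE A (Python) =====
-- def solve(word):
--     arr = []
--     for i in word:
--         if i not in arr:
--             arr.append(i)
--         elif i == arr[-1]:
--             continue
--         else:
--             return 0
--     else:
--         return 1
-- ===== SOURCE B (Python) =====
-- def solve(word):
--     runs = []
--     for c in word:
--         if not runs or runs[-1] != c:
--             runs.append(c)
--     return 1 if len(runs) == len(set(runs)) else 0
-- ===== Notes on version B (the rewrite author's own statement) =====
-- stated objective: idiomatic
-- what changed: B first run-length-compresses the word into one representative per maximal block and then returns 1 iff those representatives are all distinct, replacing A's incremental seen-list scan with early return.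
import Mathlib
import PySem

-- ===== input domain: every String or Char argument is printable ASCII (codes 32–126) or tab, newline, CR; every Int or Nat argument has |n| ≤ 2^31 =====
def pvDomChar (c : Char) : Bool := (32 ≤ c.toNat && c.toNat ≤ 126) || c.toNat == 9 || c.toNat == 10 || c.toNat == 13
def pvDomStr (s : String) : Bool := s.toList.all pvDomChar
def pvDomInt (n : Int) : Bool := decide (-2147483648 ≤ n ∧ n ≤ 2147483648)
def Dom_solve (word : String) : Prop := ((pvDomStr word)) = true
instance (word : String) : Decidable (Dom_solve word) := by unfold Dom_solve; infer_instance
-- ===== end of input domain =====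

-- B replaces A's incremental seen-list scan (with early return 0) by building the
-- run-length representatives first and then checking they are all distinct (idiomatic).

-- ===== PORT A =====
-- A's loop with early return: recursion over the characters carrying arr, the list of
-- distinct characters seen so far (in first-occurrence order).
def solveGo (arr : List Char) (cs : List Char) : Int :=
  match cs with
  | [] => 1
  | c :: rest =>
    if ¬ arr.contains c then solveGo (arr ++ [c]) rest
    else if PySem.List.pyGet? arr (-1) == some c then solveGo arr rest
    else 0

def solve (word : String) : Int := solveGo [] word.toList

-- ===== PORT B =====
-- one step of building the run representatives: append c when runs is empty or its last entry ≠ c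
def runStep (rs : List Char) (c : Char) : List Char :=
  if rs.isEmpty || !(PySem.List.pyGet? rs (-1) == some c) then rs ++ [c] else rs

def solve_alt (word : String) : Int :=
  let runs := word.toList.foldl runStep []
  if runs.length = (PySem.Set.ofList runs).length then 1 else 0

-- ===== PRECONDITION & SPEC =====
def Spec_solve (word : String) (out : Int) : Prop := out = solve_alt word
instance (word : String) (out : Int) : Decidable (Spec_solve word out) := by unfold Spec_solve; infer_instance

-- ===== CLAIM (what is proved, stated in full; the proofs are below) =====
def Claim_equal_solve : Prop := ∀ (word : String), Dom_solve word → Spec_solve word (solve word)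

-- ===== LEMMAS AND PROOFS =====

lemma runStep_sub (rs : List Char) (c : Char) : rs.Sublist (runStep rs c) := by
  unfold runStep; split_ifs <;> simp

lemma foldl_runStep_not_nodup (cs : List Char) (rs : List Char) (h : ¬ rs.Nodup) :
    ¬ (cs.foldl runStep rs).Nodup := by
  induction cs generalizing rs with
  | nil => simpa using h
  | cons c rest ih =>
      simp only [List.foldl_cons]
      exact ih _ (fun hn => h ((runStep_sub rs c).nodup hn))

lemma pyGet_neg_one (rs : List Char) : PySem.List.pyGet? rs (-1) = rs.getLast? := by
  induction rs with
  | nil => simp [PySem.List.pyGet?, PySem.List.pyIdx?]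
  | cons a l ih =>
      rcases l with _ | ⟨b, l'⟩
      · simp [PySem.List.pyGet?, PySem.List.pyIdx?]
      · simp only [PySem.List.pyGet?, PySem.List.pyIdx?] at ih ⊢
        simp only [List.length_cons] at ih ⊢
        rcases Nat.lt_or_ge 0 (b :: l').length with _ | h
        · have h1 : (-1 : Int) + ((b :: l').length + 1) = -1 + (b :: l').length + 1 := by ring
          simp only [List.getLast?_cons_cons]
          split_ifs at ih ⊢ with h2 h3 <;> simp_all <;> omega
        · simp at h

lemma go_eq_nodup (cs : List Char) (arr : List Char) (h : arr.Nodup) :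
    solveGo arr cs = if (cs.foldl runStep arr).Nodup then 1 else 0 := by
  induction cs generalizing arr with
  | nil => simp [solveGo, h]
  | cons c rest ih =>
      simp only [solveGo, List.foldl_cons]
      by_cases hc : arr.contains c
      · simp only [hc, not_true_eq_false, if_false]
        have hmem : c ∈ arr := by simpa using hc
        have hne : arr ≠ [] := by rintro rfl; simp at hmem
        by_cases hl : arr.getLast? = some c
        · -- same as last run rep: both sides skip / keep arr
          have hstep : runStep arr c = arr := by
            unfold runStep
            simp [List.isEmpty_iff, hne, pyGet_neg_one, hl]
          rw [pyGet_neg_one, hl]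
          simp only [beq_self_eq_true, if_true, hstep]
          exact ih arr h
        · -- violation: A returns 0; B's runs gain a duplicate
          have hstep : runStep arr c = arr ++ [c] := by
            unfold runStep
            have : ¬ (PySem.List.pyGet? arr (-1) == some c) = true := by
              simp [pyGet_neg_one, hl]
            simp [this]
          have hba : ¬ (PySem.List.pyGet? arr (-1) == some c) = true := by
            simp [pyGet_neg_one, hl]
          rw [if_neg (by simpa using hba)]
          have hdup : ¬ (arr ++ [c]).Nodup := by
            simp [List.nodup_append, hmem]
          simp only [hstep]
          rw [if_neg (foldl_runStep_not_nodup rest _ hdup)]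
      · -- new character
        simp only [hc, not_false_eq_true, if_true]
        have hmem : c ∉ arr := by simpa using hc
        have hstep : runStep arr c = arr ++ [c] := by
          unfold runStep
          rcases eq_or_ne arr [] with rfl | hne
          · simp
          · have hl : arr.getLast? ≠ some c := by
              intro hl; exact hmem (List.mem_of_getLast? hl)
            simp [List.isEmpty_iff, hne, pyGet_neg_one, hl]
        simp only [hstep]
        exact ih _ (by simp only [List.nodup_append]; exact ⟨h, List.nodup_singleton c, fun a ha => by simp; rintro rfl; exact hmem ha⟩)

lemma add_sublist (s : List Char) (c : Char) : (PySem.Set.add s c).Sublist (s ++ [c]) := by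
  simp only [PySem.Set.add]
  split_ifs <;> simp

lemma foldl_add_sublist (l : List Char) (s : List Char) :
    (l.foldl PySem.Set.add s).Sublist (s ++ l) := by
  induction l generalizing s with
  | nil => simp
  | cons c rest ih =>
      simp only [List.foldl_cons]
      have h1 : (PySem.Set.add s c ++ rest).Sublist (s ++ [c] ++ rest) :=
        (add_sublist s c).append_right rest
      have h2 := (ih (PySem.Set.add s c)).trans h1
      simpa using h2

lemma foldl_add_nodup (l : List Char) (s : List Char) (h : (s ++ l).Nodup) :
    l.foldl PySem.Set.add s = s ++ l := by
  induction l generalizing s with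
  | nil => simp
  | cons c rest ih =>
      have hc : c ∉ s := by
        intro hx
        have := List.disjoint_of_nodup_append h
        exact this hx (by simp)
      have hadd : PySem.Set.add s c = s ++ [c] := by
        simp only [PySem.Set.add]
        rw [if_neg (by simpa [PySem.Set.contains] using hc)]
      simp only [List.foldl_cons, hadd]
      have := ih (s ++ [c]) (by simpa using h)
      simpa using this

lemma ofList_length_eq_iff (rs : List Char) :
    rs.length = (PySem.Set.ofList rs).length ↔ rs.Nodup := by
  constructor
  · intro h
    have hsub : (PySem.Set.ofList rs).Sublist rs := by
      rw [PySem.Set.ofList_eq_foldl]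
      simpa using foldl_add_sublist rs []
    have hnd := PySem.Set.nodup_ofList rs
    have heq : PySem.Set.ofList rs = rs := hsub.eq_of_length (by omega)
    rwa [← heq]
  · intro h
    have : PySem.Set.ofList rs = rs := by
      rw [PySem.Set.ofList_eq_foldl]
      have := foldl_add_nodup rs [] (by simpa using h)
      simpa using this
    rw [this]

-- ===== VERDICT (by name: the statement is the Claim_ definition above) =====
theorem solve_spec : Claim_equal_solve := by
  intro word _
  unfold Spec_solve solve solve_alt
  rw [go_eq_nodup _ _ List.nodup_nil]
  by_cases h : (word.toList.foldl runStep []).Nodup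
  · simp [h, (ofList_length_eq_iff _).mpr h]
  · have : ¬ (word.toList.foldl runStep []).length = (PySem.Set.ofList (word.toList.foldl runStep [])).length :=
      fun he => h ((ofList_length_eq_iff _).mp he)
    simp [h, this]
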